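-- pv_equiv track=rewrite | github.com/reedgunn/Chess | backend/chess_logic.py | squares_threatened_by_sliding_piece
-- ===== SOURCE A (Python) =====
-- def is_valid_square(pos):
--     return 0 <= pos[0] <= 7 and 0 <= pos[1] <= 7
--
-- def squares_threatened_by_sliding_piece(directions, pos, board):
--     res = []
--     for direction in directions:
--         distance = 1
--         while True:
--             if is_valid_square([pos[0] + direction[0] * distance, pos[1] + direction[1] * distance]):
--                 res.append([pos[0] + direction[0] * distance, pos[1] + direction[1] * distance])
--             else:
--                 break
--             if board[pos[0] + direction[0] * distance][pos[1] + direction[1] * distance] != 0: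
--                 break
--             distance += 1
--     return res
-- ===== SOURCE B (Python) =====
-- def is_valid_square(pos):
--     return 0 <= pos[0] <= 7 and 0 <= pos[1] <= 7
--
-- def squares_threatened_by_sliding_piece(directions, pos, board):
--     res = []
--     for direction in directions:
--         # pass 1: geometry — the on-board ray; on an 8x8 board a ray has at
--         # most 8 squares, so 8 bounded steps cover every direction
--         ray = []
--         for distance in range(1, 9):
--             sq = [pos[0] + direction[0] * distance,
--                   pos[1] + direction[1] * distance]
--             if not is_valid_square(sq):
--                 break
--             ray.append(sq)
--         # pass 2: occupancy — keep squares up to and including the first blocker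
--         for sq in ray:
--             res.append(sq)
--             if board[sq[0]][sq[1]] != 0:
--                 break
--     return res
-- ===== Notes on version B (the rewrite author's own statement) =====
-- stated objective: alternative
-- what changed: B splits A's single interleaved while-True walk (validity test, append, board test, double break) into two sequential passes per direction: a bounded geometry loop (at most 8 steps, the longest ray on an 8x8 board) collecting the on-board ray, then an occupancy scan over that list stopping after the first blocker.
import Mathlib
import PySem

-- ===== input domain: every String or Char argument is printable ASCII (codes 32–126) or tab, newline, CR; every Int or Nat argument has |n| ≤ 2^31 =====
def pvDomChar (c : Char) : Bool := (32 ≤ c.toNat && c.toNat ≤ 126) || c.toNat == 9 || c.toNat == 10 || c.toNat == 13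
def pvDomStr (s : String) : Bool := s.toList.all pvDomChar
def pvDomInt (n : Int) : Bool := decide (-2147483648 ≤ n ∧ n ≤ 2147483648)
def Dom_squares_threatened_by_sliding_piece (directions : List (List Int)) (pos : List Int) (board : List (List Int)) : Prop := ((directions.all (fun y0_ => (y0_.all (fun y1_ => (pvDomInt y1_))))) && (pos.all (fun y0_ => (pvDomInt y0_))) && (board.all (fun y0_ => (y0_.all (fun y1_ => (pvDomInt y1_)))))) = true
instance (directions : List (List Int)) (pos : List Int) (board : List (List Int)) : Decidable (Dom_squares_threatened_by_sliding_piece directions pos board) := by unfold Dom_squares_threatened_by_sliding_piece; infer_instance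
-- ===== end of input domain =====

-- B splits A's interleaved while-True ray walk into two sequential passes per direction
-- (geometry: collect the on-board ray in at most 8 bounded steps; then occupancy: scan it
-- up to the first blocker); same visit order and output, different decomposition
-- ("alternative", not faster).


-- ===== PORT A =====
-- is_valid_square([r, c])
def pvIsValid (r c : Int) : Bool := decide (0 ≤ r ∧ r ≤ 7) && decide (0 ≤ c ∧ c ≤ 7)

-- board[r][c]; Python raises IndexError when the cell is missing (pyGet? = none);
-- such inputs are excluded by Pre_, so the .getD default is never reached inside Pre_.
def pvCell (board : List (List Int)) (r c : Int) : Int :=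
  (PySem.List.pyGet? ((PySem.List.pyGet? board r).getD []) c).getD 0

-- A's inner `while True` loop for one direction, starting at distance k.
-- Inside Pre_ the loop appends at most 8 squares (the longest ray a nonzero
-- direction can keep on the 8x8 board; a zero direction is blocked at once
-- inside Pre_), so a fuel of 8 produces exactly the real loop's output there.
def pvWalkA (board : List (List Int)) (p0 p1 d0 d1 : Int) : Int → Nat → List (List Int)
  | _, 0 => []
  | k, fuel + 1 =>
    if pvIsValid (p0 + d0 * k) (p1 + d1 * k) then
      [p0 + d0 * k, p1 + d1 * k] ::
        (if pvCell board (p0 + d0 * k) (p1 + d1 * k) ≠ 0 then []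
         else pvWalkA board p0 p1 d0 d1 (k + 1) fuel)
    else []

def squares_threatened_by_sliding_piece (directions : List (List Int)) (pos : List Int) (board : List (List Int)) : List (List Int) :=
  directions.foldl (fun res direction =>
    match pos, direction with
    | p0 :: p1 :: _, d0 :: d1 :: _ => res ++ pvWalkA board p0 p1 d0 d1 1 8
    | _, _ => res  -- Python raises IndexError here (pos/direction too short); excluded by Pre_
  ) []

-- ===== PORT B =====
-- pass 1: geometry — `for distance in range(1, 9)` with break on the first
-- off-board square; the fuel-8 recursion is exactly that bounded loop.
def pvRayB (p0 p1 d0 d1 : Int) : Int → Nat → List (List Int)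
  | _, 0 => []
  | k, fuel + 1 =>
    if pvIsValid (p0 + d0 * k) (p1 + d1 * k) then
      [p0 + d0 * k, p1 + d1 * k] :: pvRayB p0 p1 d0 d1 (k + 1) fuel
    else []

-- pass 2: occupancy — keep squares up to and including the first blocker
-- (squares produced by pvRayB always have two entries, so headI/tail.headI = sq[0]/sq[1])
def pvScanB (board : List (List Int)) : List (List Int) → List (List Int)
  | [] => []
  | sq :: rest =>
    sq :: (if pvCell board sq.headI sq.tail.headI ≠ 0 then [] else pvScanB board rest)

-- pos never changes, so its two coordinates are destructured once, outside the fold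
-- (with a too-short pos Python raises IndexError on any direction — excluded by Pre_ —
-- and returns [] when directions is empty, as the [] arm does)
def squares_threatened_by_sliding_piece_alt (directions : List (List Int)) (pos : List Int) (board : List (List Int)) : List (List Int) :=
  match pos with
  | p0 :: prest =>
    match prest with
    | p1 :: _ =>
      directions.foldl (fun res direction =>
        match direction with
        | d0 :: drest =>
          match drest with
          | d1 :: _ => res ++ pvScanB board (pvRayB p0 p1 d0 d1 1 8)
          | [] => res  -- Python raises IndexError here; excluded by Pre_
        | [] => res  -- Python raises IndexError here; excluded by Pre_
      ) []
    | [] => []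
  | [] => []

-- ===== PRECONDITION & SPEC =====
-- board[r][c] exists (row r present, column c inside it); probed coordinates are ≥ 0 here
def pvHasCell (board : List (List Int)) (r c : Int) : Bool :=
  match PySem.List.pyGet? board r with
  | some row => decide (0 ≤ c ∧ c < (row.length : Int))
  | none => false

-- the k-th square of the ray from (p0,p1) in direction (d0,d1) is on the 8x8 board
def pvOnBoard (p0 p1 d0 d1 k : Int) : Bool :=
  decide (0 ≤ p0 + d0 * k ∧ p0 + d0 * k ≤ 7 ∧ 0 ≤ p1 + d1 * k ∧ p1 + d1 * k ≤ 7)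

-- Pre_ excludes exactly the inputs on which A does not return: a direction or pos shorter
-- than 2 (IndexError), a zero direction whose square (= pos) is on the board with an empty
-- cell (A's while-True loop never breaks, so A loops forever), and rays where a probed
-- board cell — along the leading run of on-board squares up to the first blocker, at most
-- 8 squares, stated over k = 1..8 — is missing (IndexError).
def Pre_squares_threatened_by_sliding_piece (directions : List (List Int)) (pos : List Int) (board : List (List Int)) : Prop :=
  ∀ d ∈ directions,
    2 ≤ d.length ∧ 2 ≤ pos.length ∧
    ¬(d.headI = 0 ∧ d.tail.headI = 0 ∧
      pvOnBoard pos.headI pos.tail.headI 0 0 1 = true ∧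
      pvCell board pos.headI pos.tail.headI = 0) ∧
    ∀ k ∈ List.range 8,
      ((∀ j ∈ List.range 8, j ≤ k →
         pvOnBoard pos.headI pos.tail.headI d.headI d.tail.headI ((j : Int) + 1) = true) ∧
       (∀ j ∈ List.range 8, j < k →
         pvCell board (pos.headI + d.headI * ((j : Int) + 1))
           (pos.tail.headI + d.tail.headI * ((j : Int) + 1)) = 0)) →
      pvHasCell board (pos.headI + d.headI * ((k : Int) + 1))
        (pos.tail.headI + d.tail.headI * ((k : Int) + 1)) = true
instance (directions : List (List Int)) (pos : List Int) (board : List (List Int)) : Decidable (Pre_squares_threatened_by_sliding_piece directions pos board) := by unfold Pre_squares_threatened_by_sliding_piece; infer_instance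

def pvWitness_squares_threatened_by_sliding_piece : List (List Int) × List Int × List (List Int) :=
  ([[0, 1], [1, 1]], [3, 3],
   [[0,0,0,0,0,0,0,0],[0,0,0,0,0,0,0,0],[0,0,0,0,0,0,0,0],[0,0,0,0,0,2,0,0],
    [0,0,0,0,0,0,0,0],[0,0,0,0,0,0,0,0],[0,0,0,0,0,0,0,0],[0,0,0,0,0,0,0,0]])

def Spec_squares_threatened_by_sliding_piece (directions : List (List Int)) (pos : List Int) (board : List (List Int)) (out : List (List Int)) : Prop := out = squares_threatened_by_sliding_piece_alt directions pos board
instance (directions : List (List Int)) (pos : List Int) (board : List (List Int)) (out : List (List Int)) : Decidable (Spec_squares_threatened_by_sliding_piece directions pos board out) := by unfold Spec_squares_threatened_by_sliding_piece; infer_instance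

-- ===== CLAIM (what is proved, stated in full; the proofs are below) =====
def Claim_equal_squares_threatened_by_sliding_piece : Prop := ∀ (directions : List (List Int)) (pos : List Int) (board : List (List Int)), Dom_squares_threatened_by_sliding_piece directions pos board → Pre_squares_threatened_by_sliding_piece directions pos board → Spec_squares_threatened_by_sliding_piece directions pos board (squares_threatened_by_sliding_piece directions pos board)

-- ===== LEMMAS AND PROOFS =====
-- Scanning B's geometric ray reproduces A's interleaved walk, for any shared fuel.
theorem pvScan_ray_eq_walk (board : List (List Int)) (p0 p1 d0 d1 : Int) :
    ∀ (fuel : Nat) (k : Int),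
      pvScanB board (pvRayB p0 p1 d0 d1 k fuel) = pvWalkA board p0 p1 d0 d1 k fuel := by
  intro fuel
  induction fuel with
  | zero => intro k; rfl
  | succ f ih =>
    intro k
    simp only [pvRayB, pvWalkA]
    by_cases h : pvIsValid (p0 + d0 * k) (p1 + d1 * k) = true
    · simp [h, pvScanB, ih]
    · simp [h, pvScanB]

-- With a too-short pos every step of A's fold is the identity.
theorem pvFoldConst (directions : List (List Int)) :
    ∀ (acc : List (List Int)),
      directions.foldl (fun res (_ : List Int) => res) acc = acc := by
  induction directions with
  | nil => intro acc; rfl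
  | cons d ds ih => intro acc; simp only [List.foldl_cons]; exact ih acc

theorem pvFoldl_eq (board : List (List Int)) (p0 p1 : Int) (rest : List Int) :
    ∀ (directions : List (List Int)) (acc : List (List Int)),
      directions.foldl (fun res direction =>
        match p0 :: p1 :: rest, direction with
        | q0 :: q1 :: _, d0 :: d1 :: _ => res ++ pvWalkA board q0 q1 d0 d1 1 8
        | _, _ => res) acc
      = directions.foldl (fun res direction =>
        match direction with
        | d0 :: drest =>
          match drest with
          | d1 :: _ => res ++ pvScanB board (pvRayB p0 p1 d0 d1 1 8)
          | [] => res
        | [] => res) acc := by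
  intro directions
  induction directions with
  | nil => intro acc; rfl
  | cons d ds ih =>
    intro acc
    simp only [List.foldl_cons]
    rw [ih]
    match d with
    | [] => rfl
    | [_] => rfl
    | d0 :: d1 :: _ => simp only [pvScan_ray_eq_walk]

-- ===== VERDICT (by name: the statement is the Claim_ definition above) =====
theorem squares_threatened_by_sliding_piece_spec : Claim_equal_squares_threatened_by_sliding_piece := by
  intro directions pos board _ _
  unfold Spec_squares_threatened_by_sliding_piece
  unfold squares_threatened_by_sliding_piece squares_threatened_by_sliding_piece_alt
  match pos with
  | [] => exact pvFoldConst directions []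
  | [a] => exact pvFoldConst directions []
  | p0 :: p1 :: rest => exact pvFoldl_eq board p0 p1 rest directions []
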